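-- pv_equiv track=rewrite | github.com/mikedasquirrel/namesake | analyzers/love_words_analyzer.py | _max_consonant_cluster
-- ===== SOURCE A (Python) =====
-- def _max_consonant_cluster(text: str) -> int:
--     """Find maximum consonant cluster length"""
--     consonants = 'bcdfghjklmnpqrstvwxyzBCDFGHJKLMNPQRSTVWXYZ'
--     max_cluster = 0
--     current_cluster = 0
--
--     for char in text:
--         if char in consonants:
--             current_cluster += 1
--             max_cluster = max(max_cluster, current_cluster)
--         else:
--             current_cluster = 0
--
--     return max_cluster
-- ===== SOURCE B (Python) =====
-- def _max_consonant_cluster(text: str) -> int: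
--     """Find maximum consonant cluster length (run-extraction scan)."""
--     consonants = 'bcdfghjklmnpqrstvwxyzBCDFGHJKLMNPQRSTVWXYZ'
--     best = 0
--     i, n = 0, len(text)
--     while i < n:
--         if text[i] in consonants:
--             j = i + 1
--             while j < n and text[j] in consonants:
--                 j += 1
--             if j - i > best:
--                 best = j - i
--             i = j
--         else:
--             i += 1
--     return best
-- ===== Notes on version B (the rewrite author's own statement) =====
-- stated objective: alternative
-- what changed: Replaced the per-character current/max accumulator pair by a segment-then-maximize scan: B jumps over each maximal consonant run with an inner scan and keeps only the best run length.
import Mathlib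
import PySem

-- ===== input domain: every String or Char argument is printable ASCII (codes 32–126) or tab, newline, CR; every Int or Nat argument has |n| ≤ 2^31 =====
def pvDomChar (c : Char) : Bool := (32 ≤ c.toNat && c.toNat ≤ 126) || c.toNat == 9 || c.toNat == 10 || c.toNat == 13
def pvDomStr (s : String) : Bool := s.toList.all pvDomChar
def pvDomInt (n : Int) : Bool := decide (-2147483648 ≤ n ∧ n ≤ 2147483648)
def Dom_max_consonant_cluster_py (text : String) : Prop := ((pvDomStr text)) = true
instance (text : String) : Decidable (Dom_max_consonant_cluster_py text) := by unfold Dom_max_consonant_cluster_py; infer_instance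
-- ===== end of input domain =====

-- B replaces A's running current/max accumulator pair by a run-extraction scan
-- (skip over each maximal consonant run, keep the best length); alternative, same cost.

-- ===== PORT A =====
def pvConsonants : List Char := "bcdfghjklmnpqrstvwxyzBCDFGHJKLMNPQRSTVWXYZ".toList

def pvStepA (p : Int × Int) (c : Char) : Int × Int :=
  if pvConsonants.contains c then (max p.1 (p.2 + 1), p.2 + 1) else (p.1, 0)

def max_consonant_cluster_py (text : String) : Int :=
  (text.toList.foldl pvStepA (0, 0)).1

-- ===== PORT B =====
def pvIsCons (c : Char) : Bool := pvConsonants.contains c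

-- inner `while j < n and text[j] in consonants` = takeWhile/dropWhile on the rest
def pvRuns : List Char → Int
  | [] => 0
  | c :: rest =>
    if pvIsCons c then
      max ((1 + (rest.takeWhile pvIsCons).length : Int)) (pvRuns (rest.dropWhile pvIsCons))
    else pvRuns rest
termination_by l => l.length
decreasing_by
  · exact Nat.lt_succ_of_le (List.length_dropWhile_le _ _)
  · simp

def max_consonant_cluster_py_alt (text : String) : Int := pvRuns text.toList

-- ===== PRECONDITION & SPEC =====
def Spec_max_consonant_cluster_py (text : String) (out : Int) : Prop := out = max_consonant_cluster_py_alt text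
instance (text : String) (out : Int) : Decidable (Spec_max_consonant_cluster_py text out) := by unfold Spec_max_consonant_cluster_py; infer_instance

-- ===== CLAIM (what is proved, stated in full; the proofs are below) =====
def Claim_equal_max_consonant_cluster_py : Prop := ∀ (text : String), Dom_max_consonant_cluster_py text → Spec_max_consonant_cluster_py text (max_consonant_cluster_py text)

-- ===== LEMMAS AND PROOFS =====

-- A's loop with the max-update inlined: pvH l cur = best cluster value recorded by A
-- over l starting with current run length cur (0 if nothing is recorded).
def pvH : List Char → Int → Int
  | [], _ => 0
  | c :: rest, cur =>
    if pvIsCons c then max (cur + 1) (pvH rest (cur + 1)) else pvH rest 0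

theorem pvH_nonneg_zero : ∀ (l : List Char), 0 ≤ pvH l 0 := by
  intro l
  induction l with
  | nil => simp [pvH]
  | cons c rest ih =>
    simp only [pvH]
    split
    · exact le_trans (by norm_num) (le_max_left _ _)
    · exact ih

theorem pvFoldA_eq_pvH : ∀ (l : List Char) (m cur : Int), 0 ≤ m →
    (l.foldl pvStepA (m, cur)).1 = max m (pvH l cur) := by
  intro l
  induction l with
  | nil =>
    intro m cur hm
    simp [pvH]
    omega
  | cons c rest ih =>
    intro m cur hm
    simp only [List.foldl_cons, pvStepA, pvH, pvIsCons]
    split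
    · rw [ih (max m (cur + 1)) (cur + 1) (le_trans hm (le_max_left _ _))]
      rw [max_assoc]
    · exact ih m 0 hm

theorem pvH_run : ∀ (rest : List Char) (cur : Int), 0 ≤ cur →
    max cur (pvH rest cur) =
      max (cur + ((rest.takeWhile pvIsCons).length : Int))
          (max 0 (pvH (rest.dropWhile pvIsCons) 0)) := by
  intro rest
  induction rest with
  | nil =>
    intro cur hcur
    simp [pvH]
  | cons c rest ih =>
    intro cur hcur
    by_cases h : pvIsCons c = true
    · simp only [pvH, h, if_pos, List.takeWhile_cons_of_pos h, List.dropWhile_cons_of_pos h]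
      rw [← max_assoc, max_eq_right (by omega : cur ≤ cur + 1)]
      rw [ih (cur + 1) (by omega)]
      simp only [List.length_cons]
      push_cast
      omega
    · simp only [pvH, h, Bool.false_eq_true, if_false,
        List.takeWhile_cons_of_neg h, List.dropWhile_cons_of_neg h,
        List.length_nil, Nat.cast_zero, add_zero]
      omega

theorem pvRuns_eq_pvH : ∀ (l : List Char), pvRuns l = pvH l 0 := by
  intro l
  induction l using pvRuns.induct with
  | case1 => simp [pvRuns, pvH]
  | case2 c rest h ih =>
    rw [pvRuns, if_pos h, ih]
    rw [pvH, if_pos h]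
    have h2 := pvH_run rest 1 (by norm_num)
    rw [max_eq_right (pvH_nonneg_zero _)] at h2
    simp only [zero_add]
    omega
  | case3 c rest h ih =>
    rw [pvRuns, if_neg h, ih, pvH, if_neg h]

-- ===== VERDICT (by name: the statement is the Claim_ definition above) =====
theorem max_consonant_cluster_py_spec : Claim_equal_max_consonant_cluster_py := by
  intro text _
  unfold Spec_max_consonant_cluster_py max_consonant_cluster_py max_consonant_cluster_py_alt
  rw [pvFoldA_eq_pvH _ 0 0 le_rfl, pvRuns_eq_pvH,
    max_eq_right (pvH_nonneg_zero _)]
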